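-- pv_equiv track=rewrite | github.com/wacchoz/APR_CL | APR_CL.py | e
-- ===== SOURCE A (Python) =====
-- def isprime_slow(n):
--     if n<2:
--         return False
--     elif n==2 or n==3:
--         return True
--     elif n%2==0:
--         return False
--     else:
--         i = 3
--         while i*i <= n:
--             if n%i == 0:
--                 return False
--             i+=2
--     return True
--
-- def v(q, t):
--     ans = 0
--     while(t % q == 0):
--         ans +=1
--         t//= q
--     return ans
--
-- def e(t):
--     s = 1
--     q_list = []
--     for q in range(2, t+2):
--         if t % (q-1) == 0 and isprime_slow(q):
--             s *= q ** (1+v(q,t))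
--             q_list.append(q)
--     return 2*s, q_list
-- ===== SOURCE B (Python) =====
-- # B: instead of scanning every q in [2, t+2), enumerate the divisors d of t in
-- # O(sqrt(t)) by the pairing d <-> t//d (small divisors ascending, large cofactors
-- # reversed so the divisors come out ascending), and test primality only for q = d+1.
--
-- def _isprime(n):
--     if n < 2:
--         return False
--     d = 2
--     while d * d <= n:
--         if n % d == 0:
--             return False
--         d += 1
--     return True
--
-- def e(t):
--     if t < 1:
--         return 2, []
--     small = []
--     large = []
--     i = 1
--     while i * i <= t:
--         if t % i == 0:
--             small.append(i)
--             if t // i != i: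
--                 large.append(t // i)
--         i += 1
--     s = 1
--     q_list = []
--     for d in small + large[::-1]:
--         q = d + 1
--         if _isprime(q):
--             pe = q
--             tt = t
--             while tt % q == 0:
--                 pe *= q
--                 tt //= q
--             s *= pe
--             q_list.append(q)
--     return 2 * s, q_list
-- ===== Notes on version B (the rewrite author's own statement) =====
-- stated objective: faster
-- what changed: Instead of scanning every q in [2, t+2) and testing (q-1)|t plus primality of q, B enumerates the divisors d of t in O(sqrt(t)) via the pairing d <-> t//d (small divisors up, large cofactors reversed to keep ascending order) and runs the primality test only on the O(d(t)) candidates q = d+1.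
import Mathlib
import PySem

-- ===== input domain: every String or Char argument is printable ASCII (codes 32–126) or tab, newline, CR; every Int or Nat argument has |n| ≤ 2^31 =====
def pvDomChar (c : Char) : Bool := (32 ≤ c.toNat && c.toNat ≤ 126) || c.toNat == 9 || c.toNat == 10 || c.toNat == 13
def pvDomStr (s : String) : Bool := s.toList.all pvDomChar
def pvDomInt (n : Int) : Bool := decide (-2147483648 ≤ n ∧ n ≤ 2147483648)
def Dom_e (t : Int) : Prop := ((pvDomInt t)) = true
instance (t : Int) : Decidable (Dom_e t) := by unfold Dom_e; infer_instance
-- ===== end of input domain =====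

-- B replaces A's scan of every q in [2, t+2) by an enumeration of the divisors d of t
-- via the pairing d ↔ t // d up to √t, testing primality only for q = d + 1 (objective: faster).
-- In every loop below the Nat `fuel` argument is a totality guard only: each top-level call
-- passes more fuel than the Python loop can consume before its own condition stops it.

-- ===== PORT A =====

def isprimeLoop (fuel : Nat) (n i : Int) : Bool :=
  match fuel with
  | 0 => true
  | fuel + 1 =>
    if i * i ≤ n then
      if n % i == 0 then false
      else isprimeLoop fuel n (i + 2)
    else true

def isprime_slow (n : Int) : Bool :=
  if n < 2 then false
  else if n == 2 || n == 3 then true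
  else if n % 2 == 0 then false
  else isprimeLoop n.toNat n 3

-- the conjuncts 2 ≤ q ∧ 1 ≤ t in the guard only cut loops Python would never leave
-- (they hold on every call `e` makes and every recursive call those spawn)
def vLoop (fuel : Nat) (q t acc : Int) : Int :=
  match fuel with
  | 0 => acc
  | fuel + 1 =>
    if t % q = 0 ∧ 2 ≤ q ∧ 1 ≤ t then vLoop fuel q (PySem.Int.floordiv t q) (acc + 1) else acc

def v (q t : Int) : Int := vLoop t.toNat q t 0

def e (t : Int) : Int × List Int :=
  let r := (PySem.List.pyRange 2 (t + 2) 1).foldl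
    (fun (st : Int × List Int) q =>
      if t % (q - 1) == 0 && isprime_slow q then
        (st.1 * q ^ (1 + v q t).toNat, st.2 ++ [q])
      else st) (1, [])
  (2 * r.1, r.2)

-- ===== PORT B =====

def divLoop (fuel : Nat) (t i : Int) (small large : List Int) : List Int × List Int :=
  match fuel with
  | 0 => (small, large)
  | fuel + 1 =>
    if i * i ≤ t then
      if t % i == 0 then
        divLoop fuel t (i + 1) (small ++ [i])
          (if PySem.Int.floordiv t i != i then large ++ [PySem.Int.floordiv t i] else large)
      else divLoop fuel t (i + 1) small large
    else (small, large)

def isprimeAltLoop (fuel : Nat) (n d : Int) : Bool :=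
  match fuel with
  | 0 => true
  | fuel + 1 =>
    if d * d ≤ n then
      if n % d == 0 then false
      else isprimeAltLoop fuel n (d + 1)
    else true

def isprimeAlt (n : Int) : Bool :=
  if n < 2 then false
  else isprimeAltLoop n.toNat n 2

-- same totality guard as in vLoop
def powLoop (fuel : Nat) (q tt pe : Int) : Int :=
  match fuel with
  | 0 => pe
  | fuel + 1 =>
    if tt % q = 0 ∧ 2 ≤ q ∧ 1 ≤ tt then powLoop fuel q (PySem.Int.floordiv tt q) (pe * q) else pe

def e_alt (t : Int) : Int × List Int :=
  if t < 1 then (2, [])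
  else
    let p := divLoop t.toNat t 1 [] []
    let r := (p.1 ++ p.2.reverse).foldl
      (fun (st : Int × List Int) d =>
        if isprimeAlt (d + 1) then
          (st.1 * powLoop t.toNat (d + 1) t (d + 1), st.2 ++ [d + 1])
        else st) (1, [])
    (2 * r.1, r.2)

-- ===== PRECONDITION & SPEC =====
def Spec_e (t : Int) (out : Int × List Int) : Prop := out = e_alt t
instance (t : Int) (out : Int × List Int) : Decidable (Spec_e t out) := by unfold Spec_e; infer_instance

-- ===== CLAIM (what is proved, stated in full; the proofs are below) =====
def Claim_equal_e : Prop := ∀ (t : Int), Dom_e t → Spec_e t (e t)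

-- ===== LEMMAS AND PROOFS =====

lemma le_of_sq_le {i n : Int} (h : i * i ≤ n) : i ≤ n := by
  by_cases h0 : i ≤ 0
  · exact h0.trans ((mul_self_nonneg i).trans h)
  · have h1 : 0 < i := by omega
    nlinarith

-- what divLoop's first accumulator collects from counter i on: divisors d ≥ i with d*d ≤ t
def Ls (t i : Int) : List Int :=
  (PySem.List.pyRange i (t + 1) 1).filter (fun d => decide (d * d ≤ t) && (t % d == 0))

-- what divLoop's second accumulator collects: the cofactors t // d of those d with t // d ≠ d
def Hs (t i : Int) : List Int :=
  (Ls t i).filterMap (fun d => if PySem.Int.floordiv t d != d then some (PySem.Int.floordiv t d) else none)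

-- all divisors of t in increasing order
def Dv (t : Int) : List Int :=
  (PySem.List.pyRange 1 (t + 1) 1).filter (fun d => t % d == 0)

lemma Ls_nil {t i : Int} (hi : 1 ≤ i) (h : ¬ i * i ≤ t) : Ls t i = [] := by
  unfold Ls
  apply List.filter_eq_nil_iff.mpr
  intro d hd
  rw [PySem.List.mem_pyRange_one] at hd
  have h2 : i * i ≤ d * d := mul_le_mul hd.1 hd.1 (by omega) (by omega)
  simp only [Bool.and_eq_true, decide_eq_true_eq, not_and]
  intro hdd
  exact fun _ => h (h2.trans hdd)

lemma divLoop_spec : ∀ (fuel : Nat) (t i : Int) (small large : List Int),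
    (t + 1 - i).toNat ≤ fuel → 1 ≤ i →
    divLoop fuel t i small large = (small ++ Ls t i, large ++ Hs t i) := by
  intro fuel
  induction fuel with
  | zero =>
    intro t i small large hn hi
    have hsq : ¬ i * i ≤ t := by
      intro h
      have := le_of_sq_le h
      omega
    simp only [divLoop]
    simp [Hs, Ls_nil hi hsq]
  | succ fuel ih =>
    intro t i small large hn hi
    by_cases hsq : i * i ≤ t
    · have hit : i ≤ t := le_of_sq_le hsq
      have hn' : (t + 1 - (i + 1)).toNat ≤ fuel := by omega
      have hcons : PySem.List.pyRange i (t + 1) 1 = i :: PySem.List.pyRange (i + 1) (t + 1) 1 :=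
        PySem.List.pyRange_one_cons (by omega)
      by_cases hmod : (t % i == 0) = true
      · simp only [divLoop]
        rw [if_pos hsq, if_pos hmod, ih _ _ _ _ hn' (by omega)]
        have hLs : Ls t i = i :: Ls t (i + 1) := by
          unfold Ls
          rw [hcons, List.filter_cons_of_pos (by simp [hsq, hmod])]
        have hHs : Hs t i =
            (if PySem.Int.floordiv t i != i then [PySem.Int.floordiv t i] else []) ++ Hs t (i + 1) := by
          unfold Hs
          rw [hLs]
          by_cases hcond : (PySem.Int.floordiv t i != i) = true
          · rw [List.filterMap_cons_some (by rw [if_pos hcond]), if_pos hcond]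
            rfl
          · rw [List.filterMap_cons_none (by rw [if_neg hcond]), if_neg hcond]
            simp
        rw [hLs, hHs]
        split_ifs <;> simp [List.append_assoc]
      · simp only [divLoop]
        rw [if_pos hsq, if_neg hmod, ih _ _ _ _ hn' (by omega)]
        have hLs : Ls t i = Ls t (i + 1) := by
          unfold Ls
          rw [hcons, List.filter_cons_of_neg
            (by simp only [Bool.and_eq_true, decide_eq_true_eq, not_and]; exact fun _ => hmod)]
        have hHs : Hs t i = Hs t (i + 1) := by unfold Hs; rw [hLs]
        rw [hLs, hHs]
    · simp only [divLoop]
      rw [if_neg hsq]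
      simp [Hs, Ls_nil hi hsq]

lemma mem_Ls {t x : Int} : x ∈ Ls t 1 ↔ 1 ≤ x ∧ x ≤ t ∧ x * x ≤ t ∧ t % x = 0 := by
  unfold Ls
  simp only [List.mem_filter, PySem.List.mem_pyRange_one, Bool.and_eq_true, decide_eq_true_eq,
    beq_iff_eq]
  constructor
  · rintro ⟨⟨h1, h2⟩, h3, h4⟩
    exact ⟨h1, by omega, h3, h4⟩
  · rintro ⟨h1, h2, h3, h4⟩
    exact ⟨⟨h1, by omega⟩, h3, h4⟩

lemma mem_Dv {t x : Int} : x ∈ Dv t ↔ 1 ≤ x ∧ x ≤ t ∧ t % x = 0 := by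
  unfold Dv
  simp only [List.mem_filter, PySem.List.mem_pyRange_one, beq_iff_eq]
  constructor
  · rintro ⟨⟨h1, h2⟩, h4⟩
    exact ⟨h1, by omega, h4⟩
  · rintro ⟨h1, h2, h4⟩
    exact ⟨⟨h1, by omega⟩, h4⟩

lemma mem_Hs {t y : Int} (ht : 1 ≤ t) : y ∈ Hs t 1 ↔ 1 ≤ y ∧ y ≤ t ∧ t < y * y ∧ t % y = 0 := by
  unfold Hs
  rw [List.mem_filterMap]
  constructor
  · rintro ⟨x, hxL, hfx⟩
    rw [mem_Ls] at hxL
    obtain ⟨hx1, hxt, hxx, hxm⟩ := hxL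
    have hdvd : x ∣ t := Int.dvd_of_emod_eq_zero hxm
    rw [PySem.Int.floordiv_eq_ediv_of_pos (by omega : (0:Int) < x)] at hfx
    split at hfx
    · rename_i hne
      rw [Option.some_inj] at hfx
      subst hfx
      rw [bne_iff_ne] at hne
      have hmul : t / x * x = t := Int.ediv_mul_cancel hdvd
      have hxc : x ≤ t / x := by
        have : x * x ≤ t / x * x := by rw [hmul]; exact hxx
        exact le_of_mul_le_mul_right this (by omega)
      have hlt : x < t / x := lt_of_le_of_ne hxc (Ne.symm hne)
      have hcd : t / x ∣ t := ⟨x, hmul.symm⟩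
      refine ⟨by omega, Int.le_of_dvd (by omega) hcd, ?_, Int.emod_eq_zero_of_dvd hcd⟩
      calc t = t / x * x := hmul.symm
        _ < t / x * (t / x) := by
            apply mul_lt_mul_of_pos_left hlt
            omega
    · exact absurd hfx (by simp)
  · rintro ⟨hy1, hyt, hyy, hym⟩
    have hdvd : y ∣ t := Int.dvd_of_emod_eq_zero hym
    have hmul : t / y * y = t := Int.ediv_mul_cancel hdvd
    have hx1 : 1 ≤ t / y := by
      by_cases h0 : t / y ≤ 0
      · exfalso
        have : t / y * y ≤ 0 * y := mul_le_mul_of_nonneg_right h0 (by omega)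
        rw [hmul] at this
        omega
      · omega
    have hxy : t / y < y := by
      have : t / y * y < y * y := by rw [hmul]; exact hyy
      exact lt_of_mul_lt_mul_right this (by omega)
    refine ⟨t / y, ?_, ?_⟩
    · rw [mem_Ls]
      have hxd : t / y ∣ t := ⟨y, hmul.symm⟩
      have hlt2 : t / y * (t / y) < t := by
        calc t / y * (t / y) < t / y * y := by
              apply mul_lt_mul_of_pos_left hxy
              omega
          _ = t := hmul
      exact ⟨hx1, Int.le_of_dvd (by omega) hxd, hlt2.le, Int.emod_eq_zero_of_dvd hxd⟩
    · have hfd : PySem.Int.floordiv t (t / y) = y := by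
        rw [PySem.Int.floordiv_eq_iff_of_pos (by omega : (0:Int) < t / y)]
        have h1 : y * (t / y) = t := by rw [mul_comm]; exact hmul
        have h2 : (y + 1) * (t / y) = y * (t / y) + t / y := by ring
        omega
      rw [hfd]
      rw [if_pos (by rw [bne_iff_ne]; exact ne_of_gt hxy)]

lemma pairwise_Ls (t : Int) : (Ls t 1).Pairwise (· < ·) :=
  List.Pairwise.filter _ (PySem.List.pairwise_lt_pyRange_one 1 (t + 1))

lemma pairwise_Dv (t : Int) : (Dv t).Pairwise (· < ·) :=
  List.Pairwise.filter _ (PySem.List.pairwise_lt_pyRange_one 1 (t + 1))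

-- the cofactor map d ↦ t // d is strictly antitone on the divisors of t
lemma pairwise_Hs {t : Int} (ht : 1 ≤ t) : (Hs t 1).Pairwise (fun a b => b < a) := by
  unfold Hs
  rw [List.pairwise_filterMap]
  refine (pairwise_Ls t).imp_of_mem ?_
  intro a b ha hb hab y hy y' hy'
  rw [mem_Ls] at ha hb
  obtain ⟨ha1, -, -, ham⟩ := ha
  obtain ⟨hb1, -, -, hbm⟩ := hb
  have hda : a ∣ t := Int.dvd_of_emod_eq_zero ham
  have hdb : b ∣ t := Int.dvd_of_emod_eq_zero hbm
  rw [PySem.Int.floordiv_eq_ediv_of_pos (by omega : (0:Int) < a)] at hy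
  rw [PySem.Int.floordiv_eq_ediv_of_pos (by omega : (0:Int) < b)] at hy'
  have hya : y = t / a := by
    split at hy
    · exact (Option.some_inj.mp hy).symm
    · exact absurd hy (by simp)
  have hyb : y' = t / b := by
    split at hy'
    · exact (Option.some_inj.mp hy').symm
    · exact absurd hy' (by simp)
  subst hya hyb
  have hma : t / a * a = t := Int.ediv_mul_cancel hda
  have hmb : t / b * b = t := Int.ediv_mul_cancel hdb
  have hb0 : 1 ≤ t / b := by
    by_cases h0 : t / b ≤ 0
    · exfalso
      have : t / b * b ≤ 0 * b := mul_le_mul_of_nonneg_right h0 (by omega)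
      rw [hmb] at this
      omega
    · omega
  by_contra hcon
  push_neg at hcon
  have h1 : t / a * a ≤ t / b * a := mul_le_mul_of_nonneg_right hcon (by omega)
  have h2 : t / b * a < t / b * b := by
    apply mul_lt_mul_of_pos_left hab
    omega
  rw [hma, hmb] at *
  omega

lemma LsHs_eq {t : Int} (ht : 1 ≤ t) : Ls t 1 ++ (Hs t 1).reverse = Dv t := by
  have sLs := pairwise_Ls t
  have sHs := pairwise_Hs ht
  have sDv := pairwise_Dv t
  have sAll : (Ls t 1 ++ (Hs t 1).reverse).Pairwise (· < ·) := by
    rw [List.pairwise_append]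
    refine ⟨sLs, List.pairwise_reverse.mpr sHs, ?_⟩
    intro x hx y hy
    rw [List.mem_reverse] at hy
    rw [mem_Ls] at hx
    rw [mem_Hs ht] at hy
    obtain ⟨hx1, -, hx3, -⟩ := hx
    obtain ⟨hy1, -, hy3, -⟩ := hy
    by_contra hxy
    push_neg at hxy
    have : y * y ≤ x * x := mul_le_mul hxy hxy (by omega) (by omega)
    linarith
  have hperm : (Ls t 1 ++ (Hs t 1).reverse).Perm (Dv t) := by
    rw [List.perm_ext_iff_of_nodup (sAll.imp fun h => ne_of_lt h) (sDv.imp fun h => ne_of_lt h)]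
    intro a
    simp only [List.mem_append, List.mem_reverse, mem_Ls, mem_Hs ht, mem_Dv]
    constructor
    · rintro (⟨h1, h2, h3, h4⟩ | ⟨h1, h2, h3, h4⟩) <;> exact ⟨h1, h2, h4⟩
    · rintro ⟨h1, h2, h4⟩
      by_cases h3 : a * a ≤ t
      · exact Or.inl ⟨h1, h2, h3, h4⟩
      · exact Or.inr ⟨h1, h2, by omega, h4⟩
  exact List.eq_of_perm_of_sorted (fun a b _ _ hab hba => absurd hba (lt_asymm hab)) sAll sDv hperm

-- accumulator lemmas for the two exponent loops
lemma vLoop_acc : ∀ (fuel : Nat) (q tt acc : Int), vLoop fuel q tt acc = acc + vLoop fuel q tt 0 := by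
  intro fuel
  induction fuel with
  | zero =>
    intro q tt acc
    simp [vLoop]
  | succ fuel ih =>
    intro q tt acc
    simp only [vLoop]
    by_cases hg : tt % q = 0 ∧ 2 ≤ q ∧ 1 ≤ tt
    · rw [if_pos hg, if_pos hg, ih q _ (acc + 1), ih q _ (0 + 1)]
      omega
    · rw [if_neg hg, if_neg hg]
      omega

lemma vLoop_nonneg : ∀ (fuel : Nat) (q tt acc : Int), 0 ≤ acc → 0 ≤ vLoop fuel q tt acc := by
  intro fuel
  induction fuel with
  | zero =>
    intro q tt acc ha
    simpa [vLoop] using ha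
  | succ fuel ih =>
    intro q tt acc ha
    simp only [vLoop]
    by_cases hg : tt % q = 0 ∧ 2 ≤ q ∧ 1 ≤ tt
    · rw [if_pos hg]
      exact ih q _ (acc + 1) (by omega)
    · rw [if_neg hg]
      exact ha

lemma powLoop_eq : ∀ (fuel : Nat) (q tt pe : Int),
    powLoop fuel q tt pe = pe * q ^ (vLoop fuel q tt 0).toNat := by
  intro fuel
  induction fuel with
  | zero =>
    intro q tt pe
    simp [powLoop, vLoop]
  | succ fuel ih =>
    intro q tt pe
    simp only [powLoop, vLoop]
    by_cases hg : tt % q = 0 ∧ 2 ≤ q ∧ 1 ≤ tt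
    · rw [if_pos hg, if_pos hg, ih q _ (pe * q), vLoop_acc fuel q _ (0 + 1)]
      have h0 : 0 ≤ vLoop fuel q (PySem.Int.floordiv tt q) 0 := vLoop_nonneg fuel q _ 0 le_rfl
      have htn : (0 + 1 + vLoop fuel q (PySem.Int.floordiv tt q) 0).toNat
          = (vLoop fuel q (PySem.Int.floordiv tt q) 0).toNat + 1 := by omega
      rw [htn, pow_succ]
      ring
    · rw [if_neg hg, if_neg hg]
      simp

lemma powLoop_closed (q t : Int) : powLoop t.toNat q t q = q ^ (1 + v q t).toNat := by
  rw [powLoop_eq t.toNat q t q]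
  have h0 : 0 ≤ vLoop t.toNat q t 0 := vLoop_nonneg t.toNat q t 0 le_rfl
  have htn : (1 + v q t).toNat = (vLoop t.toNat q t 0).toNat + 1 := by unfold v; omega
  rw [htn, pow_succ]
  ring

-- the two trial-division loops agree: on odd n the step-2 loop skips only even
-- candidates, which cannot divide an odd number
lemma Bloop_spec : ∀ (fuel : Nat) (n i : Int), (n + 1 - i).toNat ≤ fuel → 2 ≤ i →
    (isprimeAltLoop fuel n i = true ↔ ∀ d, i ≤ d → d * d ≤ n → n % d ≠ 0) := by
  intro fuel
  induction fuel with
  | zero =>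
    intro n i hf hi
    simp only [isprimeAltLoop, true_iff]
    intro d hd hdd
    have hsq : ¬ i * i ≤ n := fun h => by have := le_of_sq_le h; omega
    have h2 : i * i ≤ d * d := mul_le_mul hd hd (by omega) (by omega)
    exact fun _ => hsq (h2.trans hdd)
  | succ fuel ih =>
    intro n i hf hi
    simp only [isprimeAltLoop]
    by_cases hsq : i * i ≤ n
    · have hin : i ≤ n := le_of_sq_le hsq
      rw [if_pos hsq]
      by_cases hmod : (n % i == 0) = true
      · rw [if_pos hmod]
        constructor
        · intro h
          exact absurd h (by simp)
        · intro hall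
          exact absurd (by simpa using hmod) (hall i le_rfl hsq)
      · rw [if_neg hmod]
        rw [ih n (i + 1) (by omega) (by omega)]
        constructor
        · intro h d hd hdd
          rcases (by omega : d = i ∨ i + 1 ≤ d) with rfl | hge
          · simpa using hmod
          · exact h d hge hdd
        · intro h d hd hdd
          exact h d (by omega) hdd
    · rw [if_neg hsq]
      constructor
      · intro _ d hd hdd
        have h2 : i * i ≤ d * d := mul_le_mul hd hd (by omega) (by omega)
        exact fun _ => hsq (h2.trans hdd)
      · intro _
        rfl

lemma Aloop_spec : ∀ (fuel : Nat) (n i : Int), (n + 2 - i).toNat ≤ fuel → 3 ≤ i →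
    i % 2 = 1 → n % 2 = 1 →
    (isprimeLoop fuel n i = true ↔ ∀ d, i ≤ d → d * d ≤ n → n % d ≠ 0) := by
  intro fuel
  induction fuel with
  | zero =>
    intro n i hf hi hio hno
    simp only [isprimeLoop, true_iff]
    intro d hd hdd
    have hsq : ¬ i * i ≤ n := fun h => by have := le_of_sq_le h; omega
    have h2 : i * i ≤ d * d := mul_le_mul hd hd (by omega) (by omega)
    exact fun _ => hsq (h2.trans hdd)
  | succ fuel ih =>
    intro n i hf hi hio hno
    simp only [isprimeLoop]
    by_cases hsq : i * i ≤ n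
    · have hin : i ≤ n := le_of_sq_le hsq
      rw [if_pos hsq]
      by_cases hmod : (n % i == 0) = true
      · rw [if_pos hmod]
        constructor
        · intro h
          exact absurd h (by simp)
        · intro hall
          exact absurd (by simpa using hmod) (hall i le_rfl hsq)
      · rw [if_neg hmod]
        rw [ih n (i + 2) (by omega) (by omega) (by omega) hno]
        constructor
        · intro h d hd hdd
          rcases (by omega : d = i ∨ d = i + 1 ∨ i + 2 ≤ d) with rfl | rfl | hge
          · simpa using hmod
          · intro hdvd
            have h2d : (2:Int) ∣ i + 1 := by omega
            have h2n : (2:Int) ∣ n := h2d.trans (Int.dvd_of_emod_eq_zero hdvd)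
            omega
          · exact h d hge hdd
        · intro h d hd hdd
          exact h d (by omega) hdd
    · rw [if_neg hsq]
      constructor
      · intro _ d hd hdd
        have h2 : i * i ≤ d * d := mul_le_mul hd hd (by omega) (by omega)
        exact fun _ => hsq (h2.trans hdd)
      · intro _
        rfl

lemma isprime_eq (n : Int) : isprimeAlt n = isprime_slow n := by
  unfold isprimeAlt isprime_slow
  by_cases h2 : n < 2
  · rw [if_pos h2, if_pos h2]
  · rw [if_neg h2, if_neg h2]
    by_cases h23 : (n == 2 || n == 3) = true
    · rw [if_pos h23]
      have h : n = 2 ∨ n = 3 := by simpa using h23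
      rcases h with h | h <;> subst h <;> decide
    · rw [if_neg h23]
      have hne : ¬ (n = 2 ∨ n = 3) := by simpa using h23
      have hn4 : 4 ≤ n := by omega
      by_cases hev : (n % 2 == 0) = true
      · rw [if_pos hev]
        have hB := Bloop_spec n.toNat n 2 (by omega) le_rfl
        have : ¬ (isprimeAltLoop n.toNat n 2 = true) := by
          rw [hB]
          intro hall
          exact hall 2 le_rfl (by omega) (by simpa using hev)
        simpa using this
      · rw [if_neg hev]
        have hodd : n % 2 = 1 := by
          have h01 := Int.emod_two_eq n
          simp only [beq_iff_eq] at hev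
          omega
        have hA := Aloop_spec n.toNat n 3 (by omega) (by omega) (by norm_num) hodd
        have hB := Bloop_spec n.toNat n 2 (by omega) (by omega)
        have hiff : (isprimeAltLoop n.toNat n 2 = true) ↔ (isprimeLoop n.toNat n 3 = true) := by
          rw [hA, hB]
          constructor
          · intro h d hd hdd
            exact h d (by omega) hdd
          · intro h d hd hdd
            rcases (by omega : d = 2 ∨ 3 ≤ d) with rfl | h3
            · intro hdvd
              omega
            · exact h d h3 hdd
        cases ha : isprimeAltLoop n.toNat n 2 <;> cases hb : isprimeLoop n.toNat n 3 <;> simp_all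

-- the loop shape shared by both ports: multiply-and-append under a test
lemma foldl_collect (l : List Int) (p : Int → Bool) (f g : Int → Int) (s0 : Int) (acc : List Int) :
    l.foldl (fun (st : Int × List Int) x => if p x then (st.1 * f x, st.2 ++ [g x]) else st) (s0, acc)
      = (s0 * ((l.filter p).map f).prod, acc ++ (l.filter p).map g) := by
  induction l generalizing s0 acc with
  | nil => simp
  | cons x xs ih =>
    by_cases hx : p x
    · simp only [List.foldl_cons, if_pos hx, ih, List.filter_cons_of_pos hx, List.map_cons,
        List.prod_cons]
      rw [mul_assoc]
      simp [List.append_assoc]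
    · simp only [List.foldl_cons, if_neg hx, ih, List.filter_cons_of_neg hx]

lemma shift_range (t : Int) :
    PySem.List.pyRange 2 (t + 2) 1 = (PySem.List.pyRange 1 (t + 1) 1).map (· + 1) := by
  rw [PySem.List.pyRange_one, PySem.List.pyRange_one]
  have h : (t + 2 - 2).toNat = (t + 1 - 1).toNat := by omega
  rw [h, List.map_map]
  refine List.map_congr_left fun k _ => ?_
  simp only [Function.comp]
  omega

-- ===== VERDICT (by name: the statement is the Claim_ definition above) =====
theorem e_spec : Claim_equal_e := by
  intro t _
  unfold Spec_e
  by_cases ht : t < 1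
  · have hnil : PySem.List.pyRange 2 (t + 2) 1 = [] :=
      PySem.List.pyRange_one_eq_nil (by omega)
    simp [e, e_alt, if_pos ht, hnil]
  · push_neg at ht
    have hdiv := divLoop_spec t.toNat t 1 [] [] (by omega) le_rfl
    simp only [List.nil_append] at hdiv
    rw [e, e_alt, if_neg (not_lt.mpr ht)]
    simp only [hdiv, LsHs_eq ht]
    rw [foldl_collect (PySem.List.pyRange 2 (t + 2) 1)
      (fun q => t % (q - 1) == 0 && isprime_slow q)
      (fun q => q ^ (1 + v q t).toNat) (fun q => q) 1 []]
    rw [foldl_collect (Dv t)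
      (fun d => isprimeAlt (d + 1))
      (fun d => powLoop t.toNat (d + 1) t (d + 1)) (fun d => d + 1) 1 []]
    have hfilterB : (Dv t).filter (fun d => isprimeAlt (d + 1))
        = (Dv t).filter (fun d => isprime_slow (d + 1)) :=
      List.filter_congr fun x _ => by rw [isprime_eq]
    have hmapB : ∀ (l : List Int), l.map (fun d => powLoop t.toNat (d + 1) t (d + 1))
        = l.map (fun d => (d + 1) ^ (1 + v (d + 1) t).toNat) :=
      fun l => List.map_congr_left fun d _ => powLoop_closed (d + 1) t
    rw [hfilterB, hmapB]
    rw [shift_range, List.filter_map]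
    have hfc : ((PySem.List.pyRange 1 (t + 1) 1).filter
        ((fun q => t % (q - 1) == 0 && isprime_slow q) ∘ (· + 1)))
        = (Dv t).filter (fun d => isprime_slow (d + 1)) := by
      unfold Dv
      rw [List.filter_filter]
      refine List.filter_congr fun x _ => ?_
      simp only [Function.comp]
      have hx : x + 1 - 1 = x := by omega
      rw [hx, Bool.and_comm]
    rw [hfc, List.map_map, List.map_map]
    rfl
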